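-- pv_equiv track=rewrite | github.com/jclements3/trefoil | handout/trefoil_full.py | make_tune
-- ===== SOURCE A (Python) =====
-- SCALE = ['C','D','E','F','G','A','B']
--
-- TRAVERSAL = ['CCW4','CCW3','CCW2','CW2','CW3','CW4']
--
-- def to_abc_pitch(note, ob):
--     if ob <= 0:    return note + ',,' + ','*(-ob)
--     elif ob == 1:  return note + ','
--     elif ob == 2:  return note
--     elif ob == 3:  return note.lower()
--     elif ob == 4:  return note.lower() + "'"
--     else:          return note.lower() + "'"*(ob-3)
--
-- def notes_to_abc_chord(note_names, base_octave, trans=None):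
--     if trans: note_names = [trans[n] for n in note_names]
--     abc=[]; prev_idx=-1; octave=base_octave
--     for note in note_names:
--         idx = SCALE.index(note)
--         if prev_idx != -1 and idx < prev_idx: octave += 1
--         abc.append(to_abc_pitch(note, octave))
--         prev_idx = idx
--     return '[' + ''.join(abc) + ']' if len(abc) > 1 else abc[0]
--
-- def rh(notes, trans=None): return notes_to_abc_chord(notes, 2, trans)
--
-- def lh(notes, trans=None): return notes_to_abc_chord(notes, 1, trans)
--
-- def build_voice(tokens):
--     """48 quarter notes: 4 per bar, 6 bars per source line.
--     Double bar at segment boundaries every 8 chords (2 bars)."""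
--     bars = []
--     for bar_idx in range(12):
--         start = bar_idx * 4
--         bar = ' '.join(tokens[start:start+4])
--         pos = (bar_idx + 1) * 4
--         if pos == 48:      sep = ' |]'
--         elif pos % 8 == 0: sep = ' ||'
--         else:              sep = ' |'
--         bars.append(bar + sep)
--     # Group 6 bars per line
--     lines = []
--     for i in range(0, len(bars), 6):
--         lines.append(' '.join(bars[i:i+6]))
--     return '\n'.join(lines)
--
-- def make_tune(num, title, key, trans, results):
--     rh_tokens = []
--     lh_tokens = []
--     for seg_name in TRAVERSAL:
--         for row in [r for r in results if r['seg'] == seg_name]: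
--             rh_tokens.append(rh(row['rh_notes'], trans))
--             lh_tokens.append(lh(row['lh_notes'], trans))
--
--     rh_line = build_voice(rh_tokens)
--     lh_line = build_voice(lh_tokens)
--
--     return '\n'.join([
--         f'X:{num}',
--         f'T:{title}',
--         'M:4/4',
--         'L:1/4',
--         'Q:1/4=60',
--         f'K:{key}',
--         '%%MIDI program 46',
--         '%%staves {RH LH}',
--         'V:RH clef=treble stem=up',
--         'V:LH clef=bass stem=down',
--         f'[V:RH]\n{rh_line}',
--         f'[V:LH]\n{lh_line}',
--     ])
-- ===== SOURCE B (Python) =====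
-- # B: a single stable sort of the rows by their segment's traversal rank replaces
-- # A's six per-segment filtered rescans; chords built in two phases (index list,
-- # octave scan, closed-form pitch) instead of A's stateful loop and branch chain.
-- SCALE = ['C','D','E','F','G','A','B']
-- TRAVERSAL = ['CCW4','CCW3','CCW2','CW2','CW3','CW4']
--
-- def _pitch(note, ob):
--     return note.lower() + "'" * (ob - 3) if ob >= 3 else note + ',' * (2 - ob)
--
-- def _chord(note_names, base_octave, trans):
--     names = [trans[n] for n in note_names] if trans else list(note_names)
--     idxs = [SCALE.index(n) for n in names]
--     o = base_octave
--     octs = [o]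
--     for prev_i, i in zip(idxs, idxs[1:]):
--         o += i < prev_i
--         octs.append(o)
--     parts = [_pitch(n, oc) for n, oc in zip(names, octs)]
--     return '[' + ''.join(parts) + ']' if len(parts) > 1 else parts[0]
--
-- def _voice(toks):
--     bars = [' '.join(toks[b*4:b*4+4]) +
--             (' |]' if b == 11 else ' ||' if b % 2 == 1 else ' |')
--             for b in range(12)]
--     return '\n'.join(' '.join(bars[i:i+6]) for i in (0, 6))
--
-- def make_tune(num, title, key, trans, results):
--     rows = sorted((r for r in results if r['seg'] in TRAVERSAL),
--                   key=lambda r: TRAVERSAL.index(r['seg']))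
--     tokens = [(_chord(r['rh_notes'], 2, trans), _chord(r['lh_notes'], 1, trans))
--               for r in rows]
--     rh_line = _voice([t[0] for t in tokens])
--     lh_line = _voice([t[1] for t in tokens])
--     return (f'X:{num}\nT:{title}\nM:4/4\nL:1/4\nQ:1/4=60\nK:{key}\n'
--             '%%MIDI program 46\n%%staves {RH LH}\n'
--             'V:RH clef=treble stem=up\nV:LH clef=bass stem=down\n'
--             f'[V:RH]\n{rh_line}\n[V:LH]\n{lh_line}')
-- ===== Notes on version B (the rewrite author's own statement) =====
-- stated objective: alternative
-- what changed: B replaces A's six per-segment filtered rescans of results with one stable sort of the rows keyed by their segment's traversal rank followed by a single pass, and builds each chord in two phases (scale-index list, octave scan over adjacent pairs, closed-form pitch) instead of A's stateful loop with a six-branch pitch chain; the bar/line layout is emitted by comprehensions and the header as one literal block.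
import Mathlib
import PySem

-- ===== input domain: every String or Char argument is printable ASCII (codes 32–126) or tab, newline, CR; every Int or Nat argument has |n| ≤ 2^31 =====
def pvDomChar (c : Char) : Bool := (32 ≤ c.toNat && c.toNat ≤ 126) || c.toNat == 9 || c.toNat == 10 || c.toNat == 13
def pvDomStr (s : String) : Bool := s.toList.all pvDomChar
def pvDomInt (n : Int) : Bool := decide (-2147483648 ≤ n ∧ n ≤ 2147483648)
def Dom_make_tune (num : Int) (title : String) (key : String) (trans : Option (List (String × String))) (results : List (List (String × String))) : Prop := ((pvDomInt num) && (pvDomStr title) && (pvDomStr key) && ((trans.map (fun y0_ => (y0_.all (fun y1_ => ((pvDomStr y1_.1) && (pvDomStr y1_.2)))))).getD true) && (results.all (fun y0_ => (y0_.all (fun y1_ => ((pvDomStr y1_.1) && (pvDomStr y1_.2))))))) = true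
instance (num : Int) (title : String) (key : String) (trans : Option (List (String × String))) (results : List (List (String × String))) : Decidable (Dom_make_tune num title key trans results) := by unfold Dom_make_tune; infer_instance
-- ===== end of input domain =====

-- B replaces A's six per-segment filtered rescans with ONE stable sort of the rows by their
-- segment's traversal rank plus a single pass, and builds chords in two phases with a
-- closed-form pitch; return value only, nothing is mutated.

-- ===== PORT A =====

def pySCALE : List String := ["C", "D", "E", "F", "G", "A", "B"]

def pyTRAVERSAL : List String := ["CCW4", "CCW3", "CCW2", "CW2", "CW3", "CW4"]

-- hand port of Python `s * n` on strings (exact: n ≤ 0 gives "")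
def pyStrMul (s : String) (n : Int) : String :=
  String.ofList (List.replicate n.toNat s.toList).flatten

-- SCALE.index(note), with -1 placeholder for the ValueError case (excluded by Pre_make_tune)
def pyScaleIdx (note : String) : Int :=
  match PySem.List.index? pySCALE note with
  | some k => (k : Int)
  | none => -1

def to_abc_pitch (note : String) (ob : Int) : String :=
  if ob ≤ 0 then note ++ ",," ++ pyStrMul "," (-ob)
  else if ob = 1 then note ++ ","
  else if ob = 2 then note
  else if ob = 3 then PySem.Str.lower note
  else if ob = 4 then PySem.Str.lower note ++ "'"
  else PySem.Str.lower note ++ pyStrMul "'" (ob - 3)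

-- note_names is iterated as Python iterates a string: one-character strings.
-- KeyError (trans[n]) / IndexError (abc[0] on "") raise in Python and are excluded by
-- Pre_make_tune; the "" / headD "" placeholders below are only reached outside it.
def notes_to_abc_chord (note_names : String) (base_octave : Int) (trans : Option (List (String × String))) : String :=
  let names : List String :=
    match trans with
    | some t =>
      if t = [] then note_names.toList.map (fun c => String.ofList [c])   -- empty dict is falsy
      else note_names.toList.map (fun c => ((PySem.Dict.ofList t).get? (String.ofList [c])).getD "")
    | none => note_names.toList.map (fun c => String.ofList [c])
  let st := names.foldl (fun (st : List String × Int × Int) note =>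
      let idx := pyScaleIdx note
      let octave := if st.2.1 ≠ -1 ∧ idx < st.2.1 then st.2.2 + 1 else st.2.2
      (st.1 ++ [to_abc_pitch note octave], idx, octave)) ([], -1, base_octave)
  if st.1.length > 1 then "[" ++ PySem.Str.join "" st.1 ++ "]" else st.1.headD ""

def rh_A (notes : String) (trans : Option (List (String × String))) : String :=
  notes_to_abc_chord notes 2 trans

def lh_A (notes : String) (trans : Option (List (String × String))) : String :=
  notes_to_abc_chord notes 1 trans

def build_voice (tokens : List String) : String :=
  let bars := (PySem.List.pyRange 0 12 1).foldl (fun bars bar_idx =>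
      let bar := PySem.Str.join " " (PySem.List.slice tokens (some (bar_idx * 4)) (some (bar_idx * 4 + 4)))
      let pos := (bar_idx + 1) * 4
      let sep := if pos = 48 then " |]" else if PySem.Int.mod pos 8 = 0 then " ||" else " |"
      bars ++ [bar ++ sep]) []
  let lines := (PySem.List.pyRange 0 (bars.length : Int) 6).foldl (fun lines i =>
      lines ++ [PySem.Str.join " " (PySem.List.slice bars (some i) (some (i + 6)))]) []
  PySem.Str.join "\n" lines

def make_tune (num : Int) (title : String) (key : String) (trans : Option (List (String × String))) (results : List (List (String × String))) : String :=
  let st := pyTRAVERSAL.foldl (fun (st : List String × List String) seg_name =>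
      (results.filter (fun r => (PySem.Dict.ofList r).get? "seg" == some seg_name)).foldl
        (fun (st2 : List String × List String) row =>
          (st2.1 ++ [rh_A (((PySem.Dict.ofList row).get? "rh_notes").getD "") trans],
           st2.2 ++ [lh_A (((PySem.Dict.ofList row).get? "lh_notes").getD "") trans])) st)
    ([], [])
  let rh_line := build_voice st.1
  let lh_line := build_voice st.2
  PySem.Str.join "\n"
    ["X:" ++ PySem.Int.toStr num, "T:" ++ title, "M:4/4", "L:1/4", "Q:1/4=60",
     "K:" ++ key, "%%MIDI program 46", "%%staves {RH LH}",
     "V:RH clef=treble stem=up", "V:LH clef=bass stem=down",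
     "[V:RH]\n" ++ rh_line, "[V:LH]\n" ++ lh_line]

-- ===== PORT B =====

-- r['seg'] in TRAVERSAL (KeyError on a missing 'seg' is excluded by Pre_make_tune)
def predB (row : List (String × String)) : Bool :=
  match (PySem.Dict.ofList row).get? "seg" with
  | some s => pyTRAVERSAL.contains s
  | none => false

-- TRAVERSAL.index(r['seg']); called on filtered rows only, -1 placeholder unreachable there
def rankB (row : List (String × String)) : Int :=
  match (PySem.Dict.ofList row).get? "seg" with
  | some s =>
    match PySem.List.index? pyTRAVERSAL s with
    | some k => (k : Int)
    | none => -1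
  | none => -1

def pitch_alt (note : String) (ob : Int) : String :=
  if 3 ≤ ob then PySem.Str.lower note ++ pyStrMul "'" (ob - 3) else note ++ pyStrMul "," (2 - ob)

-- same raising corners as A's chord (excluded by Pre_make_tune), same placeholders outside it
def chord_alt (note_names : String) (base_octave : Int) (trans : Option (List (String × String))) : String :=
  let names : List String :=
    match trans with
    | some t =>
      if t = [] then note_names.toList.map (fun c => String.ofList [c])
      else note_names.toList.map (fun c => ((PySem.Dict.ofList t).get? (String.ofList [c])).getD "")
    | none => note_names.toList.map (fun c => String.ofList [c])
  let idxs := names.map pyScaleIdx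
  let st := (idxs.zip (PySem.List.slice idxs (some 1) none)).foldl
      (fun (st : List Int × Int) pi =>
        let o := st.2 + (if pi.2 < pi.1 then 1 else 0)
        (st.1 ++ [o], o)) ([base_octave], base_octave)
  let parts := (names.zip st.1).map (fun p => pitch_alt p.1 p.2)
  if parts.length > 1 then "[" ++ PySem.Str.join "" parts ++ "]" else parts.headD ""

def voice_alt (toks : List String) : String :=
  let bars := (PySem.List.pyRange 0 12 1).map (fun b =>
      PySem.Str.join " " (PySem.List.slice toks (some (b * 4)) (some (b * 4 + 4))) ++
        (if b = 11 then " |]" else if PySem.Int.mod b 2 = 1 then " ||" else " |"))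
  PySem.Str.join "\n" (([0, 6] : List Int).map (fun i =>
    PySem.Str.join " " (PySem.List.slice bars (some i) (some (i + 6)))))

def make_tune_alt (num : Int) (title : String) (key : String) (trans : Option (List (String × String))) (results : List (List (String × String))) : String :=
  let rows := PySem.List.sorted (results.filter predB) rankB false
  let tokens := rows.map (fun r =>
    (chord_alt (((PySem.Dict.ofList r).get? "rh_notes").getD "") 2 trans,
     chord_alt (((PySem.Dict.ofList r).get? "lh_notes").getD "") 1 trans))
  let rh_line := voice_alt (tokens.map (fun t => t.1))
  let lh_line := voice_alt (tokens.map (fun t => t.2))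
  "X:" ++ PySem.Int.toStr num ++ "\nT:" ++ title ++ "\nM:4/4\nL:1/4\nQ:1/4=60\nK:" ++ key ++
    "\n%%MIDI program 46\n%%staves {RH LH}\nV:RH clef=treble stem=up\nV:LH clef=bass stem=down\n[V:RH]\n" ++
    rh_line ++ "\n[V:LH]\n" ++ lh_line

-- ===== PRECONDITION & SPEC =====

-- the note a character of a notes string resolves to (after the optional translation; none = KeyError)
def pvNoteOf (trans : Option (List (String × String))) (s : String) : Option String :=
  match trans with
  | none => some s
  | some t => if t = [] then some s else (PySem.Dict.ofList t).get? s

-- a notes-string value is usable: present, non-empty, every character resolves to a SCALE note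
def pvNotesOK (trans : Option (List (String × String))) (ov : Option String) : Bool :=
  ov.isSome && (ov.getD "" != "") &&
    (ov.getD "").toList.all (fun c => pySCALE.contains ((pvNoteOf trans (String.ofList [c])).getD ""))

-- Pre_ holds exactly when Python A returns: every row has a 'seg' key, and every row whose seg
-- is traversed has non-empty 'rh_notes'/'lh_notes' whose characters resolve to scale notes
-- (otherwise A raises KeyError / ValueError / IndexError).
def Pre_make_tune (num : Int) (title : String) (key : String) (trans : Option (List (String × String))) (results : List (List (String × String))) : Prop :=
  (results.all (fun r =>
    ((PySem.Dict.ofList r).get? "seg").isSome &&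
    (pyTRAVERSAL.all (fun seg =>
      !((PySem.Dict.ofList r).get? "seg" == some seg) ||
      (pvNotesOK trans ((PySem.Dict.ofList r).get? "rh_notes") &&
       pvNotesOK trans ((PySem.Dict.ofList r).get? "lh_notes")))))) = true

instance (num : Int) (title : String) (key : String) (trans : Option (List (String × String))) (results : List (List (String × String))) : Decidable (Pre_make_tune num title key trans results) := by
  unfold Pre_make_tune; infer_instance

def pvWitness_make_tune : Int × String × String × (Option (List (String × String))) × (List (List (String × String))) :=
  (1, "t", "C", none, [[("seg", "CCW4"), ("rh_notes", "CEG"), ("lh_notes", "C")]])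

def Spec_make_tune (num : Int) (title : String) (key : String) (trans : Option (List (String × String))) (results : List (List (String × String))) (out : String) : Prop := out = make_tune_alt num title key trans results
instance (num : Int) (title : String) (key : String) (trans : Option (List (String × String))) (results : List (List (String × String))) (out : String) : Decidable (Spec_make_tune num title key trans results out) := by unfold Spec_make_tune; infer_instance

-- ===== CLAIM (what is proved, stated in full; the proofs are below) =====
def Claim_equal_make_tune : Prop := ∀ (num : Int) (title : String) (key : String) (trans : Option (List (String × String))) (results : List (List (String × String))), Dom_make_tune num title key trans results → Pre_make_tune num title key trans results → Spec_make_tune num title key trans results (make_tune num title key trans results)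

-- ===== LEMMAS AND PROOFS =====

theorem strMul_single_add (l : List Char) (a b : Nat) :
    String.ofList (List.replicate (a + b) l).flatten =
    String.ofList (List.replicate a l).flatten ++ String.ofList (List.replicate b l).flatten := by
  rw [List.replicate_add, List.flatten_append, String.ofList_append]

-- A's six pitch branches are B's two
theorem pitch_eq (n : String) (ob : Int) : to_abc_pitch n ob = pitch_alt n ob := by
  unfold to_abc_pitch pitch_alt
  by_cases h0 : ob ≤ 0
  · have h3 : ¬ 3 ≤ ob := by omega
    have ht : (2 - ob).toNat = 2 + (-ob).toNat := by omega
    rw [if_pos h0, if_neg h3]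
    unfold pyStrMul
    rw [ht, strMul_single_add]
    have h2 : (String.ofList (List.replicate 2 (",").toList).flatten) = ",," := by decide
    rw [h2, String.append_assoc]
  · by_cases h1 : ob = 1
    · subst h1; norm_num [pyStrMul]
    · by_cases h2 : ob = 2
      · subst h2; norm_num [pyStrMul]
      · by_cases h3 : ob = 3
        · subst h3; norm_num [pyStrMul]
        · by_cases h4 : ob = 4
          · subst h4; norm_num [pyStrMul]
          · have h5 : 3 ≤ ob := by omega
            simp [h0, h1, h2, h3, h4, h5]

theorem pyScaleIdx_nonneg {n : String} (h : n ∈ pySCALE) : 0 ≤ pyScaleIdx n := by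
  unfold pyScaleIdx
  rcases ho : PySem.List.index? pySCALE n with _ | k
  · rw [PySem.List.index?_eq_none_iff] at ho; exact absurd h ho
  · positivity

-- the common chord spine: previous scale index (or -1), current octave, remaining names
def specGo (prev oct : Int) : List String → List String
  | [] => []
  | n :: rest =>
    let i := pyScaleIdx n
    let o := if prev ≠ -1 ∧ i < prev then oct + 1 else oct
    to_abc_pitch n o :: specGo i o rest

-- A's chord loop produces specGo
theorem foldA (names : List String) (abc : List String) (prev oct : Int) :
    (names.foldl (fun (st : List String × Int × Int) note =>
      let idx := pyScaleIdx note
      let octave := if st.2.1 ≠ -1 ∧ idx < st.2.1 then st.2.2 + 1 else st.2.2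
      (st.1 ++ [to_abc_pitch note octave], idx, octave)) (abc, prev, oct)).1 =
    abc ++ specGo prev oct names := by
  induction names generalizing abc prev oct with
  | nil => simp [specGo]
  | cons n rest ih =>
    rw [List.foldl_cons, ih]
    simp [specGo]

-- running octaves of B's adjacent-pair loop
def scanOcts (o : Int) : List (Int × Int) → List Int
  | [] => []
  | p :: rest =>
    let o' := o + (if p.2 < p.1 then 1 else 0)
    o' :: scanOcts o' rest

theorem foldB (pairs : List (Int × Int)) (acc : List Int) (o : Int) :
    (pairs.foldl (fun (st : List Int × Int) pi =>
        let o := st.2 + (if pi.2 < pi.1 then 1 else 0)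
        (st.1 ++ [o], o)) (acc, o)).1 = acc ++ scanOcts o pairs := by
  induction pairs generalizing acc o with
  | nil => simp [scanOcts]
  | cons p rest ih =>
    simp only [List.foldl_cons, ih, scanOcts]
    simp

-- B's zipped pitches equal the spine after the first note
theorem L2 (rest : List String) (p : String) (oct : Int)
    (hp : p ∈ pySCALE) (hr : ∀ n ∈ rest, n ∈ pySCALE) :
    (rest.zip (scanOcts oct ((pyScaleIdx p :: rest.map pyScaleIdx).zip (rest.map pyScaleIdx)))).map
        (fun q => pitch_alt q.1 q.2) =
    specGo (pyScaleIdx p) oct rest := by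
  induction rest generalizing p oct with
  | nil => simp [scanOcts, specGo]
  | cons n r ih =>
    have hn : n ∈ pySCALE := hr n (by simp)
    have hpn : 0 ≤ pyScaleIdx p := pyScaleIdx_nonneg hp
    have hcond : (if pyScaleIdx p ≠ -1 ∧ pyScaleIdx n < pyScaleIdx p then oct + 1 else oct)
        = oct + (if pyScaleIdx n < pyScaleIdx p then 1 else 0) := by
      split_ifs <;> omega
    simp only [List.map_cons, List.zip_cons_cons, scanOcts, specGo]
    rw [hcond]
    congr 1
    · exact (pitch_eq n _).symm
    · exact (ih n _ hn (fun m hm => hr m (by simp [hm])))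

-- both chord builders resolve characters to the same name list
theorem names_eq (v : String) (trans : Option (List (String × String))) :
    (match trans with
    | some t =>
      if t = [] then v.toList.map (fun c => String.ofList [c])
      else v.toList.map (fun c => ((PySem.Dict.ofList t).get? (String.ofList [c])).getD "")
    | none => v.toList.map (fun c => String.ofList [c])) =
    v.toList.map (fun c => (pvNoteOf trans (String.ofList [c])).getD "") := by
  cases trans with
  | none => simp [pvNoteOf]
  | some t =>
    by_cases ht : t = [] <;> simp [pvNoteOf, ht]

theorem chord_eq (v : String) (base : Int) (trans : Option (List (String × String)))
    (h : pvNotesOK trans (some v) = true) :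
    notes_to_abc_chord v base trans = chord_alt v base trans := by
  simp only [notes_to_abc_chord, chord_alt, names_eq]
  set names := v.toList.map (fun c => (pvNoteOf trans (String.ofList [c])).getD "") with hnames
  have hmem : ∀ n ∈ names, n ∈ pySCALE := by
    intro n hn
    rw [hnames] at hn
    simp only [List.mem_map] at hn
    obtain ⟨c, hc, rfl⟩ := hn
    simp only [pvNotesOK, Bool.and_eq_true, List.all_eq_true] at h
    simpa using h.2 c hc
  have hne : names ≠ [] := by
    have hv : v.toList ≠ [] := by
      intro hv
      have hv' : v = "" := by
        have := congrArg String.ofList hv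
        simpa using this
      simp [pvNotesOK, hv'] at h
    simp [hnames, hv]
  clear_value names
  clear hnames
  rw [PySem.List.slice_from_one]
  rw [foldA]
  rw [foldB]
  simp only [List.nil_append, List.singleton_append]
  have hkey : (names.zip (base :: scanOcts base
      ((names.map pyScaleIdx).zip (names.map pyScaleIdx).tail))).map
        (fun p => pitch_alt p.1 p.2) = specGo (-1) base names := by
    cases names with
    | nil => simp [specGo]
    | cons n0 rest =>
      have hn0 : n0 ∈ pySCALE := hmem n0 List.mem_cons_self
      simp only [List.map_cons, List.tail_cons, List.zip_cons_cons, specGo]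
      rw [L2 rest n0 base hn0 (fun m hm => hmem m (List.mem_cons_of_mem _ hm))]
      simp [pitch_eq]
  rw [hkey]

-- the two bar/line builders agree on every token list
theorem voice_eq (toks : List String) : build_voice toks = voice_alt toks := by
  have hr : PySem.List.pyRange 0 12 1 = [0,1,2,3,4,5,6,7,8,9,10,11] := by decide
  simp only [build_voice, voice_alt, hr]
  norm_num [PySem.Int.mod]
  have hr6 : PySem.List.pyRange 0 12 6 = [0, 6] := by decide
  rw [hr6]
  have e0 : Int.fmod 4 8 = 4 := by decide
  have e1 : Int.fmod 12 8 = 4 := by decide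
  have e2 : Int.fmod 16 8 = 0 := by decide
  have e3 : Int.fmod 20 8 = 4 := by decide
  have e4 : Int.fmod 24 8 = 0 := by decide
  have e5 : Int.fmod 28 8 = 4 := by decide
  have e6 : Int.fmod 32 8 = 0 := by decide
  have e7 : Int.fmod 36 8 = 4 := by decide
  have e8 : Int.fmod 40 8 = 0 := by decide
  have e9 : Int.fmod 44 8 = 4 := by decide
  have f1 : Int.fmod 1 2 = 1 := by decide
  have f3 : Int.fmod 3 2 = 1 := by decide
  have f4 : Int.fmod 4 2 = 0 := by decide
  have f5 : Int.fmod 5 2 = 1 := by decide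
  have f6 : Int.fmod 6 2 = 0 := by decide
  have f7 : Int.fmod 7 2 = 1 := by decide
  have f8 : Int.fmod 8 2 = 0 := by decide
  have f9 : Int.fmod 9 2 = 1 := by decide
  have f10 : Int.fmod 10 2 = 0 := by decide
  norm_num [e0,e1,e2,e3,e4,e5,e6,e7,e8,e9,f1,f3,f4,f5,f6,f7,f8,f9,f10]

-- A's header join equals B's literal concatenation
theorem header_eq (num : Int) (title key rh lh : String) :
    PySem.Str.join "\n"
      ["X:" ++ PySem.Int.toStr num, "T:" ++ title, "M:4/4", "L:1/4", "Q:1/4=60",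
       "K:" ++ key, "%%MIDI program 46", "%%staves {RH LH}",
       "V:RH clef=treble stem=up", "V:LH clef=bass stem=down",
       "[V:RH]\n" ++ rh, "[V:LH]\n" ++ lh] =
    "X:" ++ PySem.Int.toStr num ++ "\nT:" ++ title ++ "\nM:4/4\nL:1/4\nQ:1/4=60\nK:" ++ key ++
      "\n%%MIDI program 46\n%%staves {RH LH}\nV:RH clef=treble stem=up\nV:LH clef=bass stem=down\n[V:RH]\n" ++
      rh ++ "\n[V:LH]\n" ++ lh := by
  rw [← String.toList_inj]
  simp [PySem.Str.join, PySem.Chars.join, List.intercalate, String.toList_append]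

-- A's double token loop flattened
theorem tokensA {ρ : Type} (F : String → List ρ) (f g : ρ → String) (segs : List String)
    (a b : List String) :
    (segs.foldl (fun (st : List String × List String) seg =>
        (F seg).foldl (fun (st2 : List String × List String) row =>
          (st2.1 ++ [f row], st2.2 ++ [g row])) st) (a, b)) =
    (a ++ segs.flatMap (fun s => (F s).map f), b ++ segs.flatMap (fun s => (F s).map g)) := by
  induction segs generalizing a b with
  | nil => simp
  | cons s rest ih =>
    rw [List.foldl_cons]
    rw [show ((F s).foldl (fun (st2 : List String × List String) row =>
          (st2.1 ++ [f row], st2.2 ++ [g row])) (a, b)) =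
        (a ++ (F s).map f, b ++ (F s).map g) by
      rw [PySem.List.foldl_prod_mk (fun x row => x ++ [f row]) (fun x row => x ++ [g row])]
      rw [PySem.List.foldl_append_singleton_eq_map, PySem.List.foldl_append_singleton_eq_map]]
    rw [ih]
    simp

-- ---- stable sort = concatenation of per-rank filters ----

-- insert in front when strictly smaller than everything
theorem ins_front {ρ : Type} (key : ρ → Int) (x : ρ) (L : List ρ)
    (h : ∀ y ∈ L, key x < key y) :
    PySem.List.insertBy (fun a b => decide (key a < key b)) x L = x :: L := by
  cases L with
  | nil => simp [PySem.List.insertBy]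
  | cons y ys => simp [PySem.List.insertBy, h y (by simp)]

-- skip a block of not-greater elements
theorem ins_skip {ρ : Type} (key : ρ → Int) (x : ρ) (A B : List ρ)
    (h : ∀ y ∈ A, ¬ key x < key y) :
    PySem.List.insertBy (fun a b => decide (key a < key b)) x (A ++ B) =
    A ++ PySem.List.insertBy (fun a b => decide (key a < key b)) x B := by
  induction A with
  | nil => simp
  | cons a as ih =>
    simp only [List.cons_append, PySem.List.insertBy]
    rw [if_neg (by simpa using h a (by simp))]
    rw [ih (fun y hy => h y (by simp [hy]))]

-- inserting an element of rank k into rank-grouped blocks appends it to its block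
theorem ins_grouped {ρ : Type} (key : ρ → Int) (ks : List Int) (F : Int → List ρ)
    (x : ρ) (hks : ks.Pairwise (· < ·)) (hk : key x ∈ ks)
    (hF : ∀ i ∈ ks, ∀ y ∈ F i, key y = i) :
    PySem.List.insertBy (fun a b => decide (key a < key b)) x (ks.flatMap F) =
    ks.flatMap (fun i => if i = key x then F i ++ [x] else F i) := by
  induction ks with
  | nil => simp at hk
  | cons i rest ih =>
    rw [List.pairwise_cons] at hks
    simp only [List.flatMap_cons]
    by_cases hik : i = key x
    · rw [ins_skip key x (F i) _ (fun y hy => by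
        rw [hF i (by simp) y hy, ← hik]; omega)]
      rw [ins_front key x _ (fun y hy => by
        simp only [List.mem_flatMap] at hy
        obtain ⟨j, hj, hyj⟩ := hy
        rw [hF j (by simp [hj]) y hyj, ← hik]
        exact hks.1 j hj)]
      rw [if_pos hik]
      have : rest.flatMap (fun j => if j = key x then F j ++ [x] else F j) = rest.flatMap F := by
        apply List.flatMap_congr
        intro j hj
        rw [if_neg (by have := hks.1 j hj; omega)]
      rw [this]
      simp
    · rw [ins_skip key x (F i) _ (fun y hy => by
        have hkr : key x ∈ rest := by
          rcases List.mem_cons.mp hk with h | h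
          · exact absurd h.symm hik
          · exact h
        have := hks.1 _ hkr
        rw [hF i (by simp) y hy]; omega)]
      rw [if_neg (fun h => hik h)]
      rw [ih hks.2 (by
          rcases List.mem_cons.mp hk with h | h
          · exact absurd h.symm hik
          · exact h)
        (fun j hj => hF j (by simp [hj]))]

-- the insertion-sort fold keeps the rank-grouped shape
theorem fold_grouped {ρ : Type} (key : ρ → Int) (ks : List Int) (hks : ks.Pairwise (· < ·)) :
    ∀ (xs done : List ρ), (∀ x ∈ xs, key x ∈ ks) →
    xs.foldl (fun acc x => PySem.List.insertBy (fun a b => decide (key a < key b)) x acc)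
      (ks.flatMap (fun i => done.filter (fun y => key y == i))) =
    ks.flatMap (fun i => (done ++ xs).filter (fun y => key y == i)) := by
  intro xs
  induction xs with
  | nil => intro done _; simp
  | cons x rest ih =>
    intro done hmem
    rw [List.foldl_cons]
    rw [ins_grouped key ks _ x hks (hmem x (by simp))
        (fun i _ y hy => by simpa using (List.mem_filter.mp hy).2)]
    have hstep : (ks.flatMap (fun i =>
        if i = key x then done.filter (fun y => key y == i) ++ [x]
        else done.filter (fun y => key y == i))) =
        ks.flatMap (fun i => (done ++ [x]).filter (fun y => key y == i)) := by
      apply List.flatMap_congr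
      intro i _
      rw [List.filter_append]
      by_cases hi : i = key x
      · rw [if_pos hi]
        simp [hi]
      · rw [if_neg hi]
        have : (key x == i) = false := by simpa using (fun h => hi h.symm)
        simp [this]
    rw [hstep, ih (done ++ [x]) (fun y hy => hmem y (by simp [hy]))]
    simp

-- the stable sort by rank is the concatenation of the per-rank filters
theorem sorted_groups {ρ : Type} (key : ρ → Int) (ks : List Int) (hks : ks.Pairwise (· < ·))
    (xs : List ρ) (hmem : ∀ x ∈ xs, key x ∈ ks) :
    PySem.List.sorted xs key false = ks.flatMap (fun i => xs.filter (fun y => key y == i)) := by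
  rw [PySem.List.sorted_eq_foldl_insertBy]
  have h := fold_grouped key ks hks xs [] hmem
  have h0 : ks.flatMap (fun i => ([] : List ρ).filter (fun y => key y == i)) = [] := by
    simp
  rw [h0] at h
  simpa using h

-- every kept row has a traversal rank 0‥5
theorem rank_mem (r : List (String × String)) (h : predB r = true) :
    rankB r ∈ ([0, 1, 2, 3, 4, 5] : List Int) := by
  unfold predB at h
  unfold rankB
  cases hseg : (PySem.Dict.ofList r).get? "seg" with
  | none => rw [hseg] at h; simp at h
  | some s =>
    rw [hseg] at h
    by_cases h1 : s = "CCW4" <;> by_cases h2 : s = "CCW3" <;> by_cases h3 : s = "CCW2" <;>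
    by_cases h4 : s = "CW2" <;> by_cases h5 : s = "CW3" <;> by_cases h6 : s = "CW4"
    all_goals first
      | (subst_vars; decide)
      | (exfalso; simp [pyTRAVERSAL, h1, h2, h3, h4, h5, h6] at h)

-- (pred && rank == i)  =  (seg == i-th traversal name), one instance per rank
theorem point_eq (r : List (String × String)) (i : Int) (s : String)
    (hs : PySem.List.index? pyTRAVERSAL s = some i.toNat) (hnn : 0 ≤ i)
    (huniq : ∀ s' ∈ pyTRAVERSAL,
      (match PySem.List.index? pyTRAVERSAL s' with
       | some k => (k : Int)
       | none => -1) = i → s' = s) :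
    (predB r && (rankB r == i)) = ((PySem.Dict.ofList r).get? "seg" == some s) := by
  unfold predB rankB
  cases hseg : (PySem.Dict.ofList r).get? "seg" with
  | none => simp
  | some s' =>
    dsimp only
    by_cases hmem : s' ∈ pyTRAVERSAL
    · have hc : pyTRAVERSAL.contains s' = true := by simpa using hmem
      rw [hc, Bool.true_and]
      by_cases he : s' = s
      · subst he
        rw [hs]
        simp [Int.toNat_of_nonneg hnn]
      · have : (match PySem.List.index? pyTRAVERSAL s' with
            | some k => (k : Int)
            | none => -1) ≠ i := fun hcon => he (huniq s' hmem hcon)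
        have hb : ((match PySem.List.index? pyTRAVERSAL s' with
            | some k => (k : Int)
            | none => -1) == i) = false := by simpa using this
        rw [hb]
        simp [he]
    · have hc : pyTRAVERSAL.contains s' = false := by simpa using hmem
      rw [hc, Bool.false_and]
      have hns : s' ≠ s := by
        intro he; subst he
        have : PySem.List.index? pyTRAVERSAL s' = none := by
          rw [PySem.List.index?_eq_none_iff]; exact hmem
        rw [this] at hs
        simp at hs
      simp [hns]

-- a usable option value is `some` of its getD
theorem notesOK_some (trans : Option (List (String × String))) (ov : Option String)
    (h : pvNotesOK trans ov = true) : ov = some (ov.getD "") := by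
  simp only [pvNotesOK, Bool.and_eq_true, Option.isSome_iff_exists] at h
  obtain ⟨⟨⟨v, hv⟩, _⟩, _⟩ := h
  simp [hv]

-- ===== VERDICT =====

theorem make_tune_spec : Claim_equal_make_tune := by
  intro num title key trans results _ hpre
  unfold Spec_make_tune
  simp only [make_tune, make_tune_alt]
  rw [tokensA (fun seg_name => results.filter (fun r => (PySem.Dict.ofList r).get? "seg" == some seg_name))
      (fun row => rh_A (((PySem.Dict.ofList row).get? "rh_notes").getD "") trans)
      (fun row => lh_A (((PySem.Dict.ofList row).get? "lh_notes").getD "") trans) pyTRAVERSAL [] []]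
  -- B's stable sort equals the traversal-ordered concatenation of filters
  have hsort : PySem.List.sorted (results.filter predB) rankB false =
      pyTRAVERSAL.flatMap (fun s =>
        results.filter (fun r => (PySem.Dict.ofList r).get? "seg" == some s)) := by
    rw [sorted_groups rankB ([0,1,2,3,4,5] : List Int) (by decide) _
        (fun x hx => rank_mem x (List.mem_filter.mp hx).2)]
    have hfi : ∀ (i : Int) (s : String),
        PySem.List.index? pyTRAVERSAL s = some i.toNat → 0 ≤ i →
        (∀ s' ∈ pyTRAVERSAL,
          (match PySem.List.index? pyTRAVERSAL s' with
           | some k => (k : Int) | none => -1) = i → s' = s) →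
        (results.filter predB).filter (fun y => rankB y == i) =
        results.filter (fun r => (PySem.Dict.ofList r).get? "seg" == some s) := by
      intro i s hs hnn huniq
      rw [List.filter_filter]
      apply List.filter_congr
      intro r _
      rw [Bool.and_comm]
      exact point_eq r i s hs hnn huniq
    simp only [List.flatMap_cons, List.flatMap_nil, List.append_nil]
    rw [hfi 0 "CCW4" (by decide) (by decide) (by decide),
        hfi 1 "CCW3" (by decide) (by decide) (by decide),
        hfi 2 "CCW2" (by decide) (by decide) (by decide),
        hfi 3 "CW2" (by decide) (by decide) (by decide),
        hfi 4 "CW3" (by decide) (by decide) (by decide),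
        hfi 5 "CW4" (by decide) (by decide) (by decide)]
    simp [pyTRAVERSAL]
  rw [hsort]
  simp only [List.map_map, List.map_flatMap, Function.comp_def, List.map_map]
  -- per-row agreement inside the traversal
  have hrow : ∀ s ∈ pyTRAVERSAL,
      ∀ r ∈ results.filter (fun r => (PySem.Dict.ofList r).get? "seg" == some s),
      pvNotesOK trans (some (((PySem.Dict.ofList r).get? "rh_notes").getD "")) = true ∧
      pvNotesOK trans (some (((PySem.Dict.ofList r).get? "lh_notes").getD "")) = true := by
    intro s hs r hr
    rw [List.mem_filter] at hr
    obtain ⟨hrin, hseg⟩ := hr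
    simp only [Pre_make_tune, List.all_eq_true, Bool.and_eq_true] at hpre
    obtain ⟨-, hall⟩ := hpre r hrin
    have := hall s hs
    rw [hseg] at this
    simp only [Bool.not_true, Bool.false_or, Bool.and_eq_true] at this
    obtain ⟨h1, h2⟩ := this
    constructor
    · rw [← notesOK_some trans _ h1]; exact h1
    · rw [← notesOK_some trans _ h2]; exact h2
  have hflat1 : pyTRAVERSAL.flatMap (fun s =>
      (results.filter (fun r => (PySem.Dict.ofList r).get? "seg" == some s)).map
        (fun row => chord_alt (((PySem.Dict.ofList row).get? "rh_notes").getD "") 2 trans)) =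
      pyTRAVERSAL.flatMap (fun s =>
      (results.filter (fun r => (PySem.Dict.ofList r).get? "seg" == some s)).map
        (fun row => rh_A (((PySem.Dict.ofList row).get? "rh_notes").getD "") trans)) := by
    apply List.flatMap_congr
    intro s hs
    apply List.map_congr_left
    intro r hr
    simp only [rh_A]
    exact (chord_eq _ 2 trans (hrow s hs r hr).1).symm
  have hflat2 : pyTRAVERSAL.flatMap (fun s =>
      (results.filter (fun r => (PySem.Dict.ofList r).get? "seg" == some s)).map
        (fun row => chord_alt (((PySem.Dict.ofList row).get? "lh_notes").getD "") 1 trans)) =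
      pyTRAVERSAL.flatMap (fun s =>
      (results.filter (fun r => (PySem.Dict.ofList r).get? "seg" == some s)).map
        (fun row => lh_A (((PySem.Dict.ofList row).get? "lh_notes").getD "") trans)) := by
    apply List.flatMap_congr
    intro s hs
    apply List.map_congr_left
    intro r hr
    simp only [lh_A]
    exact (chord_eq _ 1 trans (hrow s hs r hr).2).symm
  rw [hflat1, hflat2, voice_eq, voice_eq, header_eq]
  simp
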